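-- pv_equiv track=rewrite | github.com/rtmuskov/test0121 | src/sitegen/pandascore.py | _has_next_page
-- ===== SOURCE A (Python) =====
-- def _has_next_page(link_header: str | None) -> bool:
--     if not link_header:
--         return False
--     parts = [p.strip() for p in link_header.split(",") if p.strip()]
--     for part in parts:
--         if 'rel="next"' in part:
--             return True
--     return False
-- ===== SOURCE B (Python) =====
-- def _has_next_page(link_header):
--     if not link_header:
--         return False
--     return 'rel="next"' in link_header
-- ===== Notes on version B (the rewrite author's own statement) =====
-- stated objective: simpler
-- what changed: B drops the comma-split, per-part strip/filter and loop entirely and does a single substring test on the whole header; this is exact because the token 'rel="next"' contains no comma and no leading/trailing whitespace, so it occurs in some stripped comma-separated part iff it occurs in the whole string.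
import Mathlib
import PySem

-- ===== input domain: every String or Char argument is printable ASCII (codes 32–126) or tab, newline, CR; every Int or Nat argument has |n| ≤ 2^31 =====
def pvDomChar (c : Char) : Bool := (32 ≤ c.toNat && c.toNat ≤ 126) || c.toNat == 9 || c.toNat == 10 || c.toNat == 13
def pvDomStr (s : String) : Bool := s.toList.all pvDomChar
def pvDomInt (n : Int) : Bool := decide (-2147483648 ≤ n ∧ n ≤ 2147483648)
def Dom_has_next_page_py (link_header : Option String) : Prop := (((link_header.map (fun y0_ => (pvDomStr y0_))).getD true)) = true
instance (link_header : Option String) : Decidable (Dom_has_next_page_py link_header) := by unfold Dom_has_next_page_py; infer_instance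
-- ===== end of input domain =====

-- B replaces A's comma-split + per-part strip/filter + loop by one substring test on the whole
-- header (exact: the token contains no comma and no edge whitespace); objective: simpler.

-- ===== PORT A =====
def has_next_page_py (link_header : Option String) : Bool :=
  match link_header with
  | none => false
  | some s =>
    if s.toList.isEmpty then false
    else
      -- parts = [p.strip() for p in link_header.split(",") if p.strip()]
      -- (sep "," is nonempty, so Str.split? returns some; getD [] only unwraps it)
      let parts : List String :=
        (((PySem.Str.split? s ",").getD []).filter
            (fun p => !((PySem.Str.strip p).toList.isEmpty))).map PySem.Str.strip
      -- for part in parts: if 'rel="next"' in part: return True / return False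
      parts.any (fun part => PySem.Str.isIn "rel=\"next\"" part)

-- ===== PORT B =====
def has_next_page_py_alt (link_header : Option String) : Bool :=
  match link_header with
  | none => false
  | some s =>
    if s.toList.isEmpty then false
    else PySem.Str.isIn "rel=\"next\"" s

-- ===== PRECONDITION & SPEC =====
def Spec_has_next_page_py (link_header : Option String) (out : Bool) : Prop := out = has_next_page_py_alt link_header
instance (link_header : Option String) (out : Bool) : Decidable (Spec_has_next_page_py link_header out) := by unfold Spec_has_next_page_py; infer_instance

-- ===== CLAIM (what is proved, stated in full; the proofs are below) =====
def Claim_equal_has_next_page_py : Prop := ∀ (link_header : Option String), Dom_has_next_page_py link_header → Spec_has_next_page_py link_header (has_next_page_py link_header)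

-- ===== LEMMAS AND PROOFS =====

-- the token, as a list of chars
def pvTok : List Char := ['r', 'e', 'l', '=', '"', 'n', 'e', 'x', 't', '"']

theorem pvTok_eq : "rel=\"next\"".toList = pvTok := by decide

-- a prefix of a ++ c :: b that avoids c is a prefix of a
theorem pv_prefix_append_cons {tok a b : List Char} {c : Char} (hc : c ∉ tok)
    (h : tok <+: a ++ c :: b) : tok <+: a := by
  by_cases hle : tok.length ≤ a.length
  · rw [List.prefix_iff_eq_take] at h
    rw [List.take_append] at h
    rw [Nat.sub_eq_zero_of_le hle, List.take_zero, List.append_nil] at h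
    rw [h]
    exact List.take_prefix _ _
  · exfalso
    replace hle : a.length < tok.length := Nat.lt_of_not_le hle
    have hlt : a.length < (a ++ c :: b).length := by simp
    have := h.getElem (i := a.length) hle
    rw [List.getElem_append_right (Nat.le_refl _)] at this
    simp at this
    exact hc (this ▸ List.getElem_mem _)

-- the token straddles no comma: infix of a ++ ',' :: b iff infix of a or of b
theorem pv_infix_append_cons {tok : List Char} {c : Char} (hne : tok ≠ []) (hc : c ∉ tok) :
    ∀ (a b : List Char), (tok <:+: a ++ c :: b ↔ tok <:+: a ∨ tok <:+: b) := by
  intro a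
  induction a with
  | nil =>
    intro b
    simp only [List.nil_append, List.infix_cons_iff]
    constructor
    · rintro (hp | hi)
      · exfalso
        cases tok with
        | nil => exact hne rfl
        | cons t ts =>
          rw [List.cons_prefix_cons] at hp
          exact hc (hp.1 ▸ List.mem_cons_self)
      · exact Or.inr hi
    · rintro (h | h)
      · exact absurd (List.eq_nil_of_infix_nil h) hne
      · exact Or.inr h
  | cons x a' ih =>
    intro b
    rw [List.cons_append, List.infix_cons_iff, List.infix_cons_iff]
    constructor
    · rintro (hp | hi)
      · exact Or.inl (Or.inl (pv_prefix_append_cons hc hp))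
      · rcases (ih b).mp hi with h | h
        · exact Or.inl (Or.inr h)
        · exact Or.inr h
    · rintro ((hp | hi) | hb)
      · exact Or.inl (hp.trans (List.prefix_append _ _))
      · exact Or.inr ((ih b).mpr (Or.inl hi))
      · exact Or.inr ((ih b).mpr (Or.inr hb))

-- a token with a non-space head survives dropWhile isspace
theorem pv_infix_dropWhile (t0 : Char) (tk : List Char) (h0 : PySem.Chars.isspace t0 = false) :
    ∀ (x : List Char), (t0 :: tk) <:+: x → (t0 :: tk) <:+: x.dropWhile PySem.Chars.isspace := by
  intro x
  induction x with
  | nil => intro h; simp at h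
  | cons c rest ih =>
    intro h
    by_cases hp : PySem.Chars.isspace c = true
    · rw [List.dropWhile_cons_of_pos hp]
      rcases List.infix_cons_iff.mp h with hpre | hinf
      · exfalso
        rw [List.cons_prefix_cons] at hpre
        rw [hpre.1] at h0
        rw [h0] at hp
        exact Bool.false_ne_true hp
      · exact ih hinf
    · rw [List.dropWhile_cons_of_neg hp]
      exact h

-- strip changes nothing about whether the token occurs
theorem pv_isIn_strip (x : List Char) :
    PySem.Chars.isIn pvTok (PySem.Chars.strip x) = PySem.Chars.isIn pvTok x := by
  rw [Bool.eq_iff_iff, PySem.Chars.isIn_iff_infix, PySem.Chars.isIn_iff_infix]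
  unfold PySem.Chars.strip PySem.Chars.rstrip PySem.Chars.lstrip
  constructor
  · intro h
    have h1 : (List.dropWhile PySem.Chars.isspace
        (List.dropWhile PySem.Chars.isspace x).reverse).reverse <:+:
        (List.dropWhile PySem.Chars.isspace x) := by
      have h0 := List.reverse_infix.mpr
        ((List.dropWhile_suffix PySem.Chars.isspace
          (l := (List.dropWhile PySem.Chars.isspace x).reverse)).isInfix)
      rwa [List.reverse_reverse] at h0
    exact h.trans (h1.trans (List.dropWhile_suffix _).isInfix)
  · intro h
    have h1 : pvTok <:+: List.dropWhile PySem.Chars.isspace x :=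
      pv_infix_dropWhile 'r' _ (by decide) x h
    have h2 : pvTok.reverse <:+: (List.dropWhile PySem.Chars.isspace x).reverse :=
      List.reverse_infix.mpr h1
    have h3 : pvTok.reverse <:+:
        List.dropWhile PySem.Chars.isspace (List.dropWhile PySem.Chars.isspace x).reverse := by
      have : pvTok.reverse = '"' :: ['t', 'x', 'e', 'n', '"', '=', 'l', 'e', 'r'] := by decide
      rw [this] at h2 ⊢
      exact pv_infix_dropWhile '"' _ (by decide) _ h2
    rw [← List.reverse_infix, List.reverse_reverse]
    exact h3

-- token occurrence splits across a comma
theorem pv_isIn_append_comma (a b : List Char) :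
    PySem.Chars.isIn pvTok (a ++ ',' :: b) =
      (PySem.Chars.isIn pvTok a || PySem.Chars.isIn pvTok b) := by
  rw [Bool.eq_iff_iff, Bool.or_eq_true, PySem.Chars.isIn_iff_infix, PySem.Chars.isIn_iff_infix,
    PySem.Chars.isIn_iff_infix]
  exact pv_infix_append_cons (by decide) (by decide) a b

-- a simple structural model of splitOn for the one-char separator ','
def pvSplitChar : List Char → List Char → List (List Char)
  | [], cur => [cur.reverse]
  | c :: rest, cur =>
    if c = ',' then cur.reverse :: pvSplitChar rest [] else pvSplitChar rest (c :: cur)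

theorem pv_splitOn_go (fuel : Nat) :
    ∀ (l cur : List Char) (acc : List (List Char)), l.length ≤ fuel →
      PySem.Chars.splitOn.go [','] fuel l cur acc = acc.reverse ++ pvSplitChar l cur := by
  induction fuel with
  | zero =>
    intro l cur acc hl
    have : l = [] := List.eq_nil_of_length_eq_zero (Nat.le_zero.mp hl)
    subst this
    simp [PySem.Chars.splitOn.go, pvSplitChar]
  | succ fuel ih =>
    intro l cur acc hl
    cases l with
    | nil => simp [PySem.Chars.splitOn.go, pvSplitChar]
    | cons c rest =>
      rw [PySem.Chars.splitOn.go]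
      by_cases hc : c = ','
      · subst hc
        have hpre : List.isPrefixOf [','] (',' :: rest) = true := by
          simp [List.isPrefixOf]
        simp only [hpre, if_true, List.length_cons, List.length_nil, List.drop_succ_cons, List.drop_zero]
        rw [ih rest [] (cur.reverse :: acc) (by simpa using Nat.le_of_succ_le_succ hl)]
        simp [pvSplitChar]
      · have hpre : List.isPrefixOf [','] (c :: rest) = false := by
          simp [List.isPrefixOf]
          exact fun h => hc h.symm
        simp only [hpre, Bool.false_eq_true, if_false]
        rw [ih rest (c :: cur) acc (by simpa using Nat.le_of_succ_le_succ hl)]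
        simp [pvSplitChar, hc]

theorem pv_splitOn_eq (cs : List Char) :
    PySem.Chars.splitOn cs [','] = pvSplitChar cs [] := by
  unfold PySem.Chars.splitOn
  rw [pv_splitOn_go (cs.length + 1) cs [] [] (Nat.le_succ _)]
  rfl

-- the heart: scanning stripped parts equals scanning the rejoined string
theorem pv_any_splitChar : ∀ (l cur : List Char),
    (pvSplitChar l cur).any (fun p => PySem.Chars.isIn pvTok (PySem.Chars.strip p)) =
      PySem.Chars.isIn pvTok (cur.reverse ++ l) := by
  intro l
  induction l with
  | nil =>
    intro cur
    simp [pvSplitChar, pv_isIn_strip]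
  | cons c rest ih =>
    intro cur
    by_cases hc : c = ','
    · subst hc
      simp only [pvSplitChar, if_true, List.any_cons]
      rw [ih [], pv_isIn_strip, pv_isIn_append_comma]
      simp
    · simp only [pvSplitChar, hc, if_false]
      rw [ih (c :: cur)]
      simp

-- isIn of the nonempty token in the empty list is false
theorem pv_isIn_nil : PySem.Chars.isIn pvTok [] = false := by decide

-- pushing the String wrappers through A's filter/map pipeline
theorem pv_lift : ∀ (pieces : List (List Char)),
    (((pieces.map String.ofList).filter
        (fun p => !((PySem.Str.strip p).toList.isEmpty))).map PySem.Str.strip).any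
      (fun part => PySem.Str.isIn "rel=\"next\"" part) =
      pieces.any (fun l => PySem.Chars.isIn pvTok (PySem.Chars.strip l)) := by
  intro pieces
  induction pieces with
  | nil => rfl
  | cons l ps ih =>
    simp only [List.map_cons, List.filter_cons]
    by_cases hg : (PySem.Chars.strip l).isEmpty = true
    · have hstrip : (PySem.Str.strip (String.ofList l)).toList = PySem.Chars.strip l := by
        rw [PySem.Str.toList_strip, String.toList_ofList]
      rw [hstrip]
      simp only [hg, Bool.not_true, Bool.false_eq_true, if_false]
      rw [ih]
      have : PySem.Chars.isIn pvTok (PySem.Chars.strip l) = false := by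
        rw [List.isEmpty_iff.mp hg]
        exact pv_isIn_nil
      simp [this]
    · have hstrip : (PySem.Str.strip (String.ofList l)).toList = PySem.Chars.strip l := by
        rw [PySem.Str.toList_strip, String.toList_ofList]
      rw [hstrip]
      simp only [hg, Bool.not_false, if_true, List.map_cons, List.any_cons]
      have hhead : PySem.Str.isIn "rel=\"next\"" (PySem.Str.strip (String.ofList l)) =
          PySem.Chars.isIn pvTok (PySem.Chars.strip l) := by
        simp only [PySem.Str.isIn, hstrip]
        rw [pvTok_eq]
      rw [hhead, ih]

-- ===== VERDICT (by name: the statement is the Claim_ definition above) =====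
theorem has_next_page_py_spec : Claim_equal_has_next_page_py := by
  intro lh _
  unfold Spec_has_next_page_py
  cases lh with
  | none => rfl
  | some s =>
    show has_next_page_py (some s) = has_next_page_py_alt (some s)
    unfold has_next_page_py has_next_page_py_alt
    by_cases he : s.toList.isEmpty = true
    · simp [he]
    · simp only [he, Bool.false_eq_true, if_false]
      have hsplit : PySem.Str.split? s "," =
          some ((PySem.Chars.splitOn s.toList [',']).map String.ofList) := by
        show Option.map _ (PySem.Chars.split? s.toList ",".toList) = _
        have : ",".toList = [','] := by decide
        rw [this]
        unfold PySem.Chars.split?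
        simp
      rw [hsplit, Option.getD_some, pv_lift, pv_splitOn_eq, pv_any_splitChar]
      simp only [List.reverse_nil, List.nil_append, PySem.Str.isIn, pvTok_eq]
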